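-- pv_equiv track=rewrite | github.com/carlos-wong/wg-manager | wg_manager/parser.py | allocate_ip
-- ===== SOURCE A (Python) =====
-- def allocate_ip(server_address: str, used_ips: set[int]) -> str:
--     """分配新的 IP 地址
--
--     Args:
--         server_address: 服务端地址，如 10.0.0.1/24
--         used_ips: 已使用的 IP 最后一位集合
--
--     Returns:
--         新的 IP 地址，如 10.0.0.2/32
--     """
--     base = server_address.split('/')[0]
--     parts = base.split('.')
--     base_prefix = '.'.join(parts[:3])
--
--     for i in range(2, 255):
--         if i not in used_ips:
--             return f"{base_prefix}.{i}/32"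
--
--     raise RuntimeError("IP 地址池已满")
-- ===== SOURCE B (Python) =====
-- def allocate_ip(server_address: str, used_ips: set[int]) -> str:
--     """分配新的 IP 地址: gap-scan over the sorted used octets."""
--     prefix = '.'.join(server_address.split('/')[0].split('.')[:3])
--     candidate = 2
--     for u in sorted(set(used_ips)):
--         if u > candidate:
--             break
--         if u == candidate:
--             candidate += 1
--     if candidate > 254:
--         raise RuntimeError("IP 地址池已满")
--     return f"{prefix}.{candidate}/32"
-- ===== Notes on version B (the rewrite author's own statement) =====
-- stated objective: alternative
-- what changed: B sorts the distinct used octets and walks them once with a moving candidate to find the first gap at or above 2, instead of A's scan over the whole range 2..254 with a membership test per candidate.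
import Mathlib
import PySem

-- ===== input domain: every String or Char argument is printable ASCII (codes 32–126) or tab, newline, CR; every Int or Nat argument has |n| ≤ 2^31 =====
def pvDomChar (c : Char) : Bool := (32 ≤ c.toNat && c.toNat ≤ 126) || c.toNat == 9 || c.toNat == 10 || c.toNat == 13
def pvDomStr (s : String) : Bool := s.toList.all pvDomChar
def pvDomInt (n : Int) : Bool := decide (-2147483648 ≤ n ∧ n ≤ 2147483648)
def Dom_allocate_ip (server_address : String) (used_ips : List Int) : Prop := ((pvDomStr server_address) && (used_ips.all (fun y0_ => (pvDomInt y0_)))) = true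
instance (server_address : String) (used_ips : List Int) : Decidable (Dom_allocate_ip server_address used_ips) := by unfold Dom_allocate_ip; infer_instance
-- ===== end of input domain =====

-- B finds the smallest free last-octet by a single gap-scan over the sorted distinct used octets instead of A's membership-test loop over the whole range 2..254; equal return values wherever A returns (Pre_ excludes the full-pool case, where the Python raises RuntimeError).


-- ===== PORT A =====
def allocate_ip (server_address : String) (used_ips : List Int) : String :=
  let base := ((PySem.Str.split? server_address "/").getD []).headD ""   -- split('/')[0]; split with non-empty sep is never empty
  let parts := (PySem.Str.split? base ".").getD []
  let base_prefix := PySem.Str.join "." (PySem.List.slice parts none (some 3))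
  match (PySem.List.pyRange 2 255 1).find? (fun i => !used_ips.contains i) with
  | some i => base_prefix ++ "." ++ PySem.Int.toStr i ++ "/32"
  | none => ""   -- Python raises RuntimeError("IP 地址池已满") here; excluded by Pre_

-- ===== PORT B =====
-- B's loop 'for u in sorted(set(used_ips)): if u > candidate: break; if u == candidate: candidate += 1'
def pvScan : List Int → Int → Int
  | [], c => c
  | u :: t, c => if c < u then c else if u = c then pvScan t (c + 1) else pvScan t c

def allocate_ip_alt (server_address : String) (used_ips : List Int) : String :=
  let base_prefix := PySem.Str.join "." (PySem.List.slice ((PySem.Str.split? (((PySem.Str.split? server_address "/").getD []).headD "") ".").getD []) none (some 3))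
  let candidate := pvScan (PySem.List.sorted (PySem.Set.ofList used_ips) (fun x => x) false) 2
  if candidate > 254 then ""   -- Python raises RuntimeError("IP 地址池已满") here; excluded by Pre_
  else base_prefix ++ "." ++ PySem.Int.toStr candidate ++ "/32"

-- ===== PRECONDITION & SPEC =====
-- Pre_ excludes exactly the full-pool inputs (every octet 2..254 already used), on which the Python A raises RuntimeError.
def Pre_allocate_ip (server_address : String) (used_ips : List Int) : Prop :=
  ∃ i ∈ PySem.List.pyRange 2 255 1, i ∉ used_ips
instance (server_address : String) (used_ips : List Int) : Decidable (Pre_allocate_ip server_address used_ips) := by unfold Pre_allocate_ip; infer_instance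

def pvWitness_allocate_ip : String × List Int := ("10.0.0.1/24", [2, 3])

def Spec_allocate_ip (server_address : String) (used_ips : List Int) (out : String) : Prop := out = allocate_ip_alt server_address used_ips
instance (server_address : String) (used_ips : List Int) (out : String) : Decidable (Spec_allocate_ip server_address used_ips out) := by unfold Spec_allocate_ip; infer_instance

-- ===== CLAIM (what is proved, stated in full; the proofs are below) =====
def Claim_equal_allocate_ip : Prop := ∀ (server_address : String) (used_ips : List Int), Dom_allocate_ip server_address used_ips → Pre_allocate_ip server_address used_ips → Spec_allocate_ip server_address used_ips (allocate_ip server_address used_ips)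

-- ===== LEMMAS AND PROOFS =====

-- the gap-scan on a strictly increasing list returns the least value ≥ c not in the list
theorem pvScan_spec (l : List Int) : ∀ c : Int, l.Pairwise (· < ·) →
    c ≤ pvScan l c ∧ pvScan l c ∉ l ∧ (∀ j, c ≤ j → j < pvScan l c → j ∈ l) := by
  induction l with
  | nil => intro c _; refine ⟨le_refl c, by simp [pvScan], ?_⟩; intro j h1 h2; simp [pvScan] at h2; omega
  | cons u t ih =>
    intro c hp
    obtain ⟨hu, ht⟩ := List.pairwise_cons.mp hp
    by_cases h1 : c < u
    · simp only [pvScan, if_pos h1]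
      refine ⟨le_refl c, ?_, ?_⟩
      · intro hc
        rcases List.mem_cons.mp hc with rfl | hct
        · omega
        · exact absurd (hu c hct) (by omega)
      · intro j hj1 hj2; omega
    · by_cases h2 : u = c
      · simp only [pvScan, if_neg h1, if_pos h2]
        obtain ⟨ih1, ih2, ih3⟩ := ih (c + 1) ht
        refine ⟨by omega, ?_, ?_⟩
        · intro hc
          rcases List.mem_cons.mp hc with heq | hct
          · omega
          · exact ih2 hct
        · intro j hj1 hj2
          by_cases hjc : j = c
          · exact List.mem_cons.mpr (Or.inl (by omega))
          · exact List.mem_cons_of_mem u (ih3 j (by omega) hj2)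
      · simp only [pvScan, if_neg h1, if_neg h2]
        obtain ⟨ih1, ih2, ih3⟩ := ih c ht
        refine ⟨ih1, ?_, ?_⟩
        · intro hc
          rcases List.mem_cons.mp hc with heq | hct
          · omega
          · exact ih2 hct
        · intro j hj1 hj2
          exact List.mem_cons_of_mem u (ih3 j hj1 hj2)

-- A's first-hit scan over range(a, b) returns m when m is the least free value ≥ a
theorem find?_range_eq (used : List Int) (b m : Int) (hb : m < b) (hm : m ∉ used) :
    ∀ n : Nat, ∀ a : Int, (m - a).toNat = n → a ≤ m → (∀ j, a ≤ j → j < m → j ∈ used) →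
    (PySem.List.pyRange a b 1).find? (fun i => !used.contains i) = some m := by
  intro n
  induction n with
  | zero =>
    intro a hn ha _
    have ham : a = m := by omega
    subst ham
    rw [PySem.List.pyRange_one_cons (by omega)]
    exact List.find?_cons_of_pos (by simpa using hm)
  | succ k ih =>
    intro a hn ha hpre
    rw [PySem.List.pyRange_one_cons (by omega)]
    rw [List.find?_cons_of_neg (by simpa using hpre a le_rfl (by omega))]
    exact ih (a + 1) (by omega) (by omega) (fun j hj1 hj2 => hpre j (by omega) hj2)

-- rendering of the result octet (proof-only helper)
def pvRender (server_address : String) (o : Option Int) : String :=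
  let base := ((PySem.Str.split? server_address "/").getD []).headD ""
  let parts := (PySem.Str.split? base ".").getD []
  let base_prefix := PySem.Str.join "." (PySem.List.slice parts none (some 3))
  match o with
  | some i => base_prefix ++ "." ++ PySem.Int.toStr i ++ "/32"
  | none => ""

set_option maxRecDepth 8000 in
theorem allocate_ip_eq_render (server_address : String) (used_ips : List Int) :
    allocate_ip server_address used_ips
      = pvRender server_address ((PySem.List.pyRange 2 255 1).find? (fun i => !used_ips.contains i)) := rfl

set_option maxRecDepth 8000 in
theorem allocate_ip_alt_eq_render (server_address : String) (used_ips : List Int) :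
    allocate_ip_alt server_address used_ips
      = (if pvScan (PySem.List.sorted (PySem.Set.ofList used_ips) (fun x => x) false) 2 > 254 then ""
         else pvRender server_address (some (pvScan (PySem.List.sorted (PySem.Set.ofList used_ips) (fun x => x) false) 2))) := rfl

-- ===== VERDICT (by name: the statement is the Claim_ definition above) =====
theorem allocate_ip_spec : Claim_equal_allocate_ip := by
  intro server_address used_ips _ hpre
  show allocate_ip server_address used_ips = allocate_ip_alt server_address used_ips
  obtain ⟨i, hi, hiu⟩ := hpre
  rw [PySem.List.mem_pyRange_one] at hi
  have hS : (PySem.List.sorted (PySem.Set.ofList used_ips) (fun x => x) false).Pairwise (· < ·) :=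
    PySem.List.sorted_ofList_pairwise_lt used_ips
  have hmem : ∀ x : Int, x ∈ PySem.List.sorted (PySem.Set.ofList used_ips) (fun x => x) false ↔ x ∈ used_ips := by
    intro x; rw [PySem.List.mem_sorted, PySem.Set.mem_ofList]
  obtain ⟨h1, h2, h3⟩ := pvScan_spec (PySem.List.sorted (PySem.Set.ofList used_ips) (fun x => x) false) 2 hS
  set m := pvScan (PySem.List.sorted (PySem.Set.ofList used_ips) (fun x => x) false) 2 with hm
  have hmu : m ∉ used_ips := fun h => h2 ((hmem m).mpr h)
  have hmi : m ≤ i := by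
    by_contra h
    push Not at h
    exact hiu ((hmem i).mp (h3 i hi.1 h))
  have hfind := find?_range_eq used_ips 255 m (by omega) hmu (m - 2).toNat 2 rfl (by omega)
    (fun j hj1 hj2 => (hmem j).mp (h3 j hj1 hj2))
  rw [allocate_ip_eq_render, allocate_ip_alt_eq_render, hfind, if_neg (by omega)]
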